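-- pv_equiv track=rewrite | github.com/JustAFloatingHead/KuhanPiirran | FunctionOperator.py | is_multiplied_alpha_starter
-- ===== SOURCE A (Python) =====
-- def is_nro_symbol_sequence(strin): #TESTED
--     #add_to_call_counter("is_nro_symbol_sequence")
--     for cha in strin:
--         if cha not in ["0","1","2","3","4","5","6","7","8","9","."]:
--             return False
--     return True
--
-- def is_nros_and_letters(strin):#TESTED
--     for cha in strin:
--         if is_nro_symbol_sequence(cha)==False and cha.isalpha()==False and cha != " ": #" " option added 19.1 hope it doensn't break anything
--             return False
--     return True
--
-- def is_pure_alpha(strin):#TESTED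
--     for cha in strin:
--         if cha.isalpha()==False:
--             return False
--     return True
--
-- def is_alpha_starter(strin):#TESTED
--     if len(strin)==0:
--         return False
--     if is_nros_and_letters(strin)==False:
--         return False
--     if is_pure_alpha(strin[0])==False: #strin must start with at least one alpha
--         return False
--
--     bets_are_off=False
--     for cha in strin:
--         if cha.isalpha()==False and cha!=" ": #i.e. it is a number, " " option added 20.1
--             bets_are_off=True
--         if bets_are_off and cha.isalpha():
--             return False
--     return True
--
-- def is_multiplied_alpha_starter(strin):#TESTED
--     if is_nros_and_letters(strin)==False:
--         return False
--     bets_are_off=False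
--     for i in range(len(strin)):
--         if strin[i].isalpha():
--             return is_alpha_starter(strin[i:])
--     return False #in this case there where only numbers
-- ===== SOURCE B (Python) =====
-- def is_multiplied_alpha_starter(strin):
--     seen_alpha = False
--     bets_off = False
--     for cha in strin:
--         if cha not in "0123456789." and not cha.isalpha() and cha != " ":
--             return False
--         if seen_alpha:
--             if bets_off and cha.isalpha():
--                 return False
--             if not cha.isalpha() and cha != " ":
--                 bets_off = True
--         elif cha.isalpha():
--             seen_alpha = True
--     return seen_alpha
-- ===== Notes on version B (the rewrite author's own statement) =====
-- stated objective: simpler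
-- what changed: Replaced A's three-helper multi-scan structure (validate all chars, find first alpha via an index loop taking slices, re-validate and re-scan the slice in is_alpha_starter) by one left-to-right pass carrying two booleans (seen_alpha, bets_off).
import Mathlib
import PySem

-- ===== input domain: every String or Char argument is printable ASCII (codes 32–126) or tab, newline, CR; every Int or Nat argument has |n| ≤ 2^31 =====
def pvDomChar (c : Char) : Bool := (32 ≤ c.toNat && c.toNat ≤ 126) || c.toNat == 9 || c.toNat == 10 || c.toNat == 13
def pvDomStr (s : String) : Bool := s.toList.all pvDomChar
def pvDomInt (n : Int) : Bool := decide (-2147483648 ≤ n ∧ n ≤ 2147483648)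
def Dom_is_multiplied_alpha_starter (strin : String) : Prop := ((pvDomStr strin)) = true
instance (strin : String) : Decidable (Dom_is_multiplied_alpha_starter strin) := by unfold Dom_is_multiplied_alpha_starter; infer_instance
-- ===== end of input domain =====

-- B replaces A's three-helper multi-scan structure by a single left-to-right pass
-- carrying two booleans (seen_alpha, bets_off); objective: simpler.

-- ===== PORT A =====

-- is_nro_symbol_sequence
def pvNroSymbolSequence : List Char → Bool
  | [] => true
  | c :: rest =>
    if c ∉ ['0','1','2','3','4','5','6','7','8','9','.'] then false
    else pvNroSymbolSequence rest

-- is_nros_and_letters  (each Python iteration char is a 1-char string, hence [c])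
def pvNrosAndLetters : List Char → Bool
  | [] => true
  | c :: rest =>
    if pvNroSymbolSequence [c] = false ∧ PySem.Chars.isalpha c = false ∧ c ≠ ' ' then false
    else pvNrosAndLetters rest

-- is_pure_alpha
def pvPureAlpha : List Char → Bool
  | [] => true
  | c :: rest =>
    if PySem.Chars.isalpha c = false then false
    else pvPureAlpha rest

-- the bets_are_off loop inside is_alpha_starter
def pvAlphaStarterLoop : List Char → Bool → Bool
  | [], _ => true
  | c :: rest, bets =>
    if (if PySem.Chars.isalpha c = false ∧ c ≠ ' ' then true else bets) ∧ PySem.Chars.isalpha c then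
      false
    else pvAlphaStarterLoop rest (if PySem.Chars.isalpha c = false ∧ c ≠ ' ' then true else bets)

-- is_alpha_starter (strin[0] is a 1-char string, iterated by is_pure_alpha)
def pvAlphaStarter (l : List Char) : Bool :=
  if l.length = 0 then false
  else if pvNrosAndLetters l = false then false
  else if pvPureAlpha (l.take 1) = false then false
  else pvAlphaStarterLoop l false

-- the 'for i in range(len(strin))' loop of is_multiplied_alpha_starter,
-- iterating i = successively dropping the scanned prefix; strin[i:] = the current suffix
def pvMainLoop : List Char → Bool
  | [] => false
  | c :: rest =>
    if PySem.Chars.isalpha c then pvAlphaStarter (c :: rest)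
    else pvMainLoop rest

def is_multiplied_alpha_starter (strin : String) : Bool :=
  if pvNrosAndLetters strin.toList = false then false
  else pvMainLoop strin.toList

-- ===== PORT B =====

-- the single pass with state (seen_alpha, bets_off)
def pvAltGo : List Char → Bool → Bool → Bool
  | [], seen, _ => seen
  | c :: rest, seen, bets =>
    if c ∉ "0123456789.".toList ∧ PySem.Chars.isalpha c = false ∧ c ≠ ' ' then false
    else if seen then
      if bets ∧ PySem.Chars.isalpha c then false
      else pvAltGo rest seen
             (if PySem.Chars.isalpha c = false ∧ c ≠ ' ' then true else bets)
    else pvAltGo rest (PySem.Chars.isalpha c) bets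

def is_multiplied_alpha_starter_alt (strin : String) : Bool :=
  pvAltGo strin.toList false false

-- ===== PRECONDITION & SPEC =====
def Spec_is_multiplied_alpha_starter (strin : String) (out : Bool) : Prop := out = is_multiplied_alpha_starter_alt strin
instance (strin : String) (out : Bool) : Decidable (Spec_is_multiplied_alpha_starter strin out) := by unfold Spec_is_multiplied_alpha_starter; infer_instance

-- ===== CLAIM (what is proved, stated in full; the proofs are below) =====
def Claim_equal_is_multiplied_alpha_starter : Prop := ∀ (strin : String), Dom_is_multiplied_alpha_starter strin → Spec_is_multiplied_alpha_starter strin (is_multiplied_alpha_starter strin)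

-- ===== LEMMAS AND PROOFS =====

-- allowed characters, as both sides test them
def pvAllowed (c : Char) : Bool :=
  decide (c ∈ ['0','1','2','3','4','5','6','7','8','9','.']) || PySem.Chars.isalpha c || c = ' '

theorem pvNal_cons (c : Char) (rest : List Char) :
    pvNrosAndLetters (c :: rest) = (pvAllowed c && pvNrosAndLetters rest) := by
  simp [pvNrosAndLetters, pvNroSymbolSequence, pvAllowed]
  by_cases h1 : c ∈ ['0','1','2','3','4','5','6','7','8','9','.'] <;>
    by_cases h2 : PySem.Chars.isalpha c = false <;>
      by_cases h3 : c = ' ' <;> simp_all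

theorem pvDigits_eq : ("0123456789.".toList : List Char) = ['0','1','2','3','4','5','6','7','8','9','.'] := by decide

theorem pvGuard_false (c : Char) (hc : pvAllowed c = true) :
    ¬ (c ∉ "0123456789.".toList ∧ PySem.Chars.isalpha c = false ∧ c ≠ ' ') := by
  rintro ⟨h1, h2, h3⟩
  rw [pvDigits_eq] at h1
  simp [pvAllowed, h2, h3] at hc
  simp at h1
  tauto

theorem pvGuard_true (c : Char) (hc : pvAllowed c = false) :
    c ∉ "0123456789.".toList ∧ PySem.Chars.isalpha c = false ∧ c ≠ ' ' := by
  rw [pvDigits_eq]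
  simp [pvAllowed] at hc
  refine ⟨by simp; tauto, by tauto, by tauto⟩

-- if some character is disallowed, B's pass returns false whatever its state
theorem pvAltGo_false (l : List Char) : ∀ seen bets : Bool, pvNrosAndLetters l = false →
    pvAltGo l seen bets = false := by
  induction l with
  | nil => intro _ _ h; simp [pvNrosAndLetters] at h
  | cons c rest ih =>
    intro seen bets h
    rw [pvNal_cons] at h
    simp only [pvAltGo]
    by_cases hc : pvAllowed c = true
    · simp [hc] at h
      rw [if_neg (pvGuard_false c hc)]
      split_ifs <;> first | rfl | exact ih _ _ h
    · simp at hc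
      rw [if_pos (pvGuard_true c hc)]

-- on an all-allowed suffix, A's bets loop equals B's pass with seen_alpha already true
theorem pvLoop_eq (l : List Char) : ∀ bets : Bool, pvNrosAndLetters l = true →
    pvAlphaStarterLoop l bets = pvAltGo l true bets := by
  induction l with
  | nil => intro _ _; simp [pvAlphaStarterLoop, pvAltGo]
  | cons c rest ih =>
    intro bets h
    rw [pvNal_cons] at h
    simp only [Bool.and_eq_true] at h
    obtain ⟨hc, hrest⟩ := h
    simp only [pvAlphaStarterLoop, pvAltGo]
    rw [if_neg (pvGuard_false c hc), if_pos trivial]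
    by_cases ha : PySem.Chars.isalpha c = true
    · have hne : ¬ (PySem.Chars.isalpha c = false ∧ c ≠ ' ') := by simp [ha]
      simp only [if_neg hne]
      split_ifs with hb
      · rfl
      · exact ih bets hrest
    · simp only [Bool.not_eq_true] at ha
      by_cases hsp : c = ' '
      · have hne : ¬ (PySem.Chars.isalpha c = false ∧ c ≠ ' ') := by simp [hsp]
        simp only [if_neg hne]
        have hf : ¬ (bets = true ∧ PySem.Chars.isalpha c = true) := by simp [ha]
        simp only [if_neg hf]
        exact ih bets hrest
      · have hset : PySem.Chars.isalpha c = false ∧ c ≠ ' ' := ⟨ha, hsp⟩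
        simp only [if_pos hset]
        have hf1 : ¬ (True ∧ PySem.Chars.isalpha c = true) := by simp [ha]
        have hf2 : ¬ (bets = true ∧ PySem.Chars.isalpha c = true) := by simp [ha]
        simp only [if_neg hf1, if_neg hf2]
        exact ih true hrest

-- on an all-allowed list, A's find-first-alpha loop equals B's pass from the initial state
theorem pvMain_eq (l : List Char) : pvNrosAndLetters l = true →
    pvMainLoop l = pvAltGo l false false := by
  induction l with
  | nil => intro _; simp [pvMainLoop, pvAltGo]
  | cons c rest ih =>
    intro h
    have h' := h
    rw [pvNal_cons] at h'
    simp only [Bool.and_eq_true] at h'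
    obtain ⟨hc, hrest⟩ := h'
    simp only [pvMainLoop, pvAltGo]
    rw [if_neg (pvGuard_false c hc), if_neg (by simp : ¬ (false = true))]
    by_cases ha : PySem.Chars.isalpha c = true
    · rw [if_pos ha, ha]
      -- is_alpha_starter on the suffix: all three entry checks pass
      simp [pvAlphaStarter, h, pvPureAlpha, ha]
      -- unfold the first step of the bets loop (first char is alpha, bets stays false)
      have hne : ¬ (PySem.Chars.isalpha c = false ∧ c ≠ ' ') := by simp [ha]
      simp only [pvAlphaStarterLoop, if_neg hne]
      have hf : ¬ (false = true ∧ PySem.Chars.isalpha c = true) := by simp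
      simp only [if_neg hf]
      exact pvLoop_eq rest false hrest
    · simp only [Bool.not_eq_true] at ha
      rw [if_neg (by simp [ha] : ¬ PySem.Chars.isalpha c = true), ha]
      exact ih hrest

-- ===== VERDICT (by name: the statement is the Claim_ definition above) =====
theorem is_multiplied_alpha_starter_spec : Claim_equal_is_multiplied_alpha_starter := by
  intro strin _
  unfold Spec_is_multiplied_alpha_starter is_multiplied_alpha_starter is_multiplied_alpha_starter_alt
  by_cases h : pvNrosAndLetters strin.toList = true
  · simp [h, pvMain_eq _ h]
  · simp only [Bool.not_eq_true] at h
    simp [h, pvAltGo_false _ _ _ h]
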